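-- pv_equiv track=rewrite | github.com/Ramsaidhanumuri/Repo_DSA | InterviewBit/Math/Adhoc/Step by Step.py | solve
-- ===== SOURCE A (Python) =====
-- import math
--
-- def solve(A):
--     A = abs(A)
--     i = int(math.sqrt(1+8*A)-1)//2
--     running_sum = i*(i+1)//2
--
--     if running_sum < A:
--         i += 1
--         running_sum += i
--
--     while (running_sum-A)%2 != 0:
--         i += 1
--         running_sum += i
--
--     return i
-- ===== SOURCE B (Python) =====
-- def solve(A):
--     A = abs(A)
--     i = 0
--     s = 0
--     while s < A or (s - A) % 2 != 0:
--         i += 1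
--         s += i
--     return i
-- ===== Notes on version B (the rewrite author's own statement) =====
-- stated objective: simpler
-- what changed: Replaced the float-sqrt closed form (solve the quadratic for the triangular index, then bump and parity-correct) by one plain accumulation loop that walks the triangular numbers until the sum reaches the target with the right parity.
import Mathlib
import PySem

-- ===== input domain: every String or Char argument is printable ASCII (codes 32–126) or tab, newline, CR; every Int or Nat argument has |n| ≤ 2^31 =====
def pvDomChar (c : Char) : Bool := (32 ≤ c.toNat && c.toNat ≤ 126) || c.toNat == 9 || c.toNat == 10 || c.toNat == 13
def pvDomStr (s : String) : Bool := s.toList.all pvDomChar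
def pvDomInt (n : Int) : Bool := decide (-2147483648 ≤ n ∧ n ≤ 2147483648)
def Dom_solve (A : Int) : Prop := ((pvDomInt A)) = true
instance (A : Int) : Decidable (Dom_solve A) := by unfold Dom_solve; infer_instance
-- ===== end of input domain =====

-- B replaces A's float-sqrt closed form by a single plain accumulation loop (simpler; not faster).

-- ===== PORT A =====
-- the parity-fixing while loop of A; fuel 3 suffices: among two consecutive
-- increments i+1, i+2 one is odd, so the parity of running_sum-A flips within
-- two iterations and the loop exits
def solveWhileA (a i s : Int) : Nat → Int
  | 0 => i
  | f + 1 =>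
    if PySem.Int.mod (s - a) 2 ≠ 0 then solveWhileA a (i + 1) (s + (i + 1)) f
    else i

def solve (A : Int) : Int :=
  let a : Int := |A|
  -- int(math.sqrt(1+8*A)-1): on Dom 1+8|A| < 2^35 ≪ 2^53, so the float sqrt is
  -- exact and this equals the integer sqrt minus one
  let i0 : Int := PySem.Int.floordiv (((Nat.sqrt (1 + 8 * a).toNat : Nat) : Int) - 1) 2
  let s0 : Int := PySem.Int.floordiv (i0 * (i0 + 1)) 2
  let i1 : Int := if s0 < a then i0 + 1 else i0
  let s1 : Int := if s0 < a then s0 + (i0 + 1) else s0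
  solveWhileA a i1 s1 3

-- ===== PORT B =====
-- B's while loop; fuel |A|+3 suffices: after at most |A| iterations s ≥ |A|
-- (s is the i-th triangular number ≥ i), then at most 2 parity iterations
def solveLoopB (a i s : Int) : Nat → Int
  | 0 => i
  | f + 1 =>
    if s < a ∨ PySem.Int.mod (s - a) 2 ≠ 0 then solveLoopB a (i + 1) (s + (i + 1)) f
    else i

def solve_alt (A : Int) : Int :=
  let a : Int := |A|
  solveLoopB a 0 0 (a.toNat + 3)

-- ===== PRECONDITION & SPEC =====
def Spec_solve (A : Int) (out : Int) : Prop := out = solve_alt A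
instance (A : Int) (out : Int) : Decidable (Spec_solve A out) := by unfold Spec_solve; infer_instance

-- ===== CLAIM (what is proved, stated in full; the proofs are below) =====
def Claim_equal_solve : Prop := ∀ (A : Int), Dom_solve A → Spec_solve A (solve A)

-- ===== LEMMAS AND PROOFS =====

theorem pymod2 (x : Int) : PySem.Int.mod x 2 = x % 2 :=
  PySem.Int.mod_eq_emod_of_pos (by norm_num)

-- once s ≥ a (and i ≥ 0, so s never decreases), the two loops coincide
theorem loops_eq (a i s : Int) (hi : 0 ≤ i) (hs : a ≤ s) :
    solveWhileA a i s 3 = solveLoopB a i s 3 := by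
  simp only [solveWhileA, solveLoopB, pymod2]
  split_ifs <;> first | rfl | omega

-- once s ≥ a (and i ≥ 0) the loop terminates within 2 iterations, so any
-- extra fuel beyond 3 is irrelevant
theorem loopB_fuel (f : Nat) (a i s : Int) (hi : 0 ≤ i) (hs : a ≤ s) :
    solveLoopB a i s (f + 3) = solveLoopB a i s 3 := by
  show solveLoopB a i s (f + 2 + 1) = solveLoopB a i s (2 + 1)
  simp only [solveLoopB, pymod2]
  split_ifs <;> first | rfl | (exfalso; omega)

-- B's loop skips the first n indices as long as all their triangular values
-- stay below a (state invariant 2*s = i*(i+1))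
theorem loopB_skip (a : Int) (n : Nat) : ∀ (i s s' : Int) (g : Nat), 0 ≤ i →
    2 * s = i * (i + 1) → 2 * s' = (i + (n : Int)) * (i + (n : Int) + 1) →
    (∀ k : Nat, k < n → (i + (k : Int)) * (i + (k : Int) + 1) < 2 * a) →
    solveLoopB a i s (n + g) = solveLoopB a (i + (n : Int)) s' g := by
  induction n with
  | zero =>
    intro i s s' g hi hs hs' _
    have : s = s' := by push_cast at hs'; nlinarith
    simp [this]
  | succ n ih =>
    intro i s s' g hi hs hs' hlt
    have h0 : i * (i + 1) < 2 * a := by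
      have := hlt 0 (Nat.succ_pos n); push_cast at this; simpa using this
    have hsa : s < a := by nlinarith
    have hfe : n + 1 + g = (n + g) + 1 := by omega
    rw [hfe]
    simp only [solveLoopB]
    rw [if_pos (Or.inl hsa)]
    have := ih (i + 1) (s + (i + 1)) s' g (by omega) (by ring_nf; ring_nf at hs; omega)
      (by push_cast at hs'; nlinarith [hs']) ?_
    · rw [this]; congr 1; push_cast; ring
    · intro k hk
      have := hlt (k + 1) (by omega)
      push_cast at this ⊢; nlinarith [this]

-- square monotonicity helper for the prefix condition
theorem tri_mono (m n : Int) (hm : 0 ≤ m) (h : m ≤ n) : m * (m + 1) ≤ n * (n + 1) := by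
  nlinarith

theorem main_eq (A : Int) : solve A = solve_alt A := by
  unfold solve solve_alt
  set a : Int := |A| with ha
  have ha0 : 0 ≤ a := abs_nonneg A
  -- integer sqrt facts
  set n : Nat := (1 + 8 * a).toNat with hn
  set k : Nat := Nat.sqrt n with hk
  have hn1 : (n : Int) = 1 + 8 * a := by omega
  have hk1 : 1 ≤ k := by
    have : 1 ≤ n := by omega
    simpa [hk] using Nat.sqrt_pos.mpr this
  have hklo : (k : Int) * k ≤ 1 + 8 * a := by
    have h := Nat.sqrt_le' n
    rw [pow_two] at h
    rw [← hn1]; exact_mod_cast h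
  have hkhi : 1 + 8 * a < ((k : Int) + 1) * ((k : Int) + 1) := by
    have h := Nat.lt_succ_sqrt' n
    rw [Nat.succ_eq_add_one, pow_two] at h
    rw [← hn1]; exact_mod_cast h
  set i0 : Int := PySem.Int.floordiv ((k : Int) - 1) 2 with hi0
  have hi0e : i0 = ((k : Int) - 1) / 2 := by
    rw [hi0, PySem.Int.floordiv_eq_ediv_of_pos (by norm_num)]
  have hi0b : 2 * i0 = (k : Int) - 1 ∨ 2 * i0 = (k : Int) - 2 := by
    rw [hi0e]; omega
  have hi0nn : 0 ≤ i0 := by rw [hi0e]; omega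
  set s0 : Int := PySem.Int.floordiv (i0 * (i0 + 1)) 2 with hs0
  have hdvd : 2 ∣ i0 * (i0 + 1) := by
    obtain ⟨c, hc⟩ := Int.even_mul_succ_self i0
    exact ⟨c, by omega⟩
  have hs0e : 2 * s0 = i0 * (i0 + 1) := by
    rw [hs0, PySem.Int.floordiv_eq_ediv_of_pos (by norm_num)]
    obtain ⟨c, hc⟩ := hdvd
    rw [hc]; omega
  -- i0 is the largest index with triangular value ≤ a
  have hlow : i0 * (i0 + 1) ≤ 2 * a := by
    have h1 : 2 * i0 + 1 ≤ (k : Int) := by omega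
    nlinarith
  have hhigh : 2 * a < (i0 + 1) * (i0 + 2) := by
    have h1 : (k : Int) + 1 ≤ 2 * i0 + 3 := by omega
    nlinarith
  set i1 : Int := if s0 < a then i0 + 1 else i0 with hi1
  set s1 : Int := if s0 < a then s0 + (i0 + 1) else s0 with hs1
  have hs1e : 2 * s1 = i1 * (i1 + 1) := by
    rw [hi1, hs1]; split_ifs <;> [skip; exact hs0e]
    ring_nf; ring_nf at hs0e; linarith
  have hi1nn : 0 ≤ i1 := by rw [hi1]; split_ifs <;> omega
  have has1 : a ≤ s1 := by
    rw [hi1] at hs1e; rw [hs1]; split_ifs at hs1e ⊢ with h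
    · nlinarith
    · omega
  have hpre : ∀ m : Int, 0 ≤ m → m < i1 → m * (m + 1) < 2 * a := by
    intro m hm hmlt
    rw [hi1] at hmlt; split_ifs at hmlt with h
    · have := tri_mono m i0 hm (by omega); nlinarith
    · have := tri_mono m (i0 - 1) hm (by omega)
      have : m * (m + 1) ≤ i0 * (i0 + 1) - 2 * i0 := by nlinarith
      omega
  -- i1 ≤ a, so the fuel a.toNat + 3 covers the skip phase
  have hi1a : i1 ≤ a := by
    rcases eq_or_lt_of_le hi1nn with h | h
    · omega
    · by_contra hcon
      have hc1 : a + 1 ≤ i1 := by omega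
      have hm := hpre (i1 - 1) (by omega) (by omega)
      have h2 := tri_mono a (i1 - 1) ha0 (by omega)
      by_cases hA : a = 0
      · rw [hA] at h2 hm; nlinarith
      · have h1a : (1 : Int) ≤ a := by omega
        nlinarith [mul_le_mul_of_nonneg_left h1a ha0]
  -- assemble
  have hfuel : a.toNat + 3 = i1.toNat + ((a.toNat - i1.toNat) + 3) := by omega
  rw [loops_eq a i1 s1 hi1nn has1]
  show solveLoopB a i1 s1 3 = solveLoopB a 0 0 (a.toNat + 3)
  rw [hfuel,
    loopB_skip a i1.toNat 0 0 s1 ((a.toNat - i1.toNat) + 3) le_rfl (by ring)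
      (by rw [Int.toNat_of_nonneg hi1nn]; simpa using hs1e)
      (by intro m hm
          have := hpre (m : Int) (by positivity) (by omega)
          simpa using this),
    Int.toNat_of_nonneg hi1nn]
  simp only [zero_add]
  exact (loopB_fuel (a.toNat - i1.toNat) a i1 s1 hi1nn has1).symm

-- ===== VERDICT (by name: the statement is the Claim_ definition above) =====
theorem solve_spec : Claim_equal_solve := by
  intro A _
  unfold Spec_solve
  exact main_eq A
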